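-- pv_equiv track=rewrite | github.com/ValerieBG/DartmouthCS1 | recitation/feb27.py | func6
-- ===== SOURCE A (Python) =====
-- def func6(glist, p):
--     if len(glist) == 0:
--         return 0
--
--     i = glist[0]
--     l = glist[1:]
--     if i % p == 0:
--         return i + func6(l, p)
--     else:
--         return func6(l, p)
-- ===== SOURCE B (Python) =====
-- def func6(glist, p):
--     total = 0
--     for x in glist:
--         if x % p == 0:
--             total += x
--     return total
-- ===== Notes on version B (the rewrite author's own statement) =====
-- stated objective: simpler
-- what changed: Replaced the head/tail recursion (which copies glist[1:] at every step) by a single iterative loop over the list with an accumulator.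
import Mathlib
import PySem

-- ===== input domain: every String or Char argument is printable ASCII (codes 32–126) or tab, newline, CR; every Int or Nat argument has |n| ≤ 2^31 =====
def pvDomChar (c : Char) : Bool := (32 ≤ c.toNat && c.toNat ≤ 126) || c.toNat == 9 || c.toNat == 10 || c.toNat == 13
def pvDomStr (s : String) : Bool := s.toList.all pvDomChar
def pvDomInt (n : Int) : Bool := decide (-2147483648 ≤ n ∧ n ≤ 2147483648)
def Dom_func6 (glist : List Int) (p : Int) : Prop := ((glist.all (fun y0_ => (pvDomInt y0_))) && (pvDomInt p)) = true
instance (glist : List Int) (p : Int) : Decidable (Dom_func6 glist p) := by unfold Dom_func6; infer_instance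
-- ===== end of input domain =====

-- B replaces A's head/tail recursion by an iterative accumulator loop (objective: simpler).

-- ===== PORT A =====
-- literal port of A: empty-list base case, then head/tail recursion
def func6 (glist : List Int) (p : Int) : Int :=
  match glist with
  | [] => 0
  | i :: l =>
    if PySem.Int.mod i p == 0 then i + func6 l p
    else func6 l p

-- ===== PORT B =====
-- literal port of B: loop over the list accumulating total
def func6_alt (glist : List Int) (p : Int) : Int :=
  glist.foldl (fun total x => if PySem.Int.mod x p == 0 then total + x else total) 0

-- ===== PRECONDITION & SPEC =====
-- Pre_ excludes exactly the inputs where Python A raises ZeroDivisionError: p = 0 with a nonempty list.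
def Pre_func6 (glist : List Int) (p : Int) : Prop := glist = [] ∨ p ≠ 0
instance (glist : List Int) (p : Int) : Decidable (Pre_func6 glist p) := by unfold Pre_func6; infer_instance
def pvWitness_func6 : List Int × Int := ([6, 7, 9], 3)

def Spec_func6 (glist : List Int) (p : Int) (out : Int) : Prop := out = func6_alt glist p
instance (glist : List Int) (p : Int) (out : Int) : Decidable (Spec_func6 glist p out) := by unfold Spec_func6; infer_instance

-- ===== CLAIM (what is proved, stated in full; the proofs are below) =====
def Claim_equal_func6 : Prop := ∀ (glist : List Int) (p : Int), Dom_func6 glist p → Pre_func6 glist p → Spec_func6 glist p (func6 glist p)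

-- ===== LEMMAS AND PROOFS =====
lemma func6_foldl (glist : List Int) (p : Int) (acc : Int) :
    glist.foldl (fun total x => if PySem.Int.mod x p == 0 then total + x else total) acc
      = acc + func6 glist p := by
  induction glist generalizing acc with
  | nil => simp [func6]
  | cons i l ih =>
    rw [List.foldl, func6]
    by_cases h : (PySem.Int.mod i p == 0) = true
    · rw [if_pos h, if_pos h, ih]; ring
    · rw [if_neg h, if_neg h, ih]

-- ===== VERDICT (by name: the statement is the Claim_ definition above) =====
theorem func6_spec : Claim_equal_func6 := by
  intro glist p _ _
  unfold Spec_func6 func6_alt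
  rw [func6_foldl]
  ring
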